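-- pv_equiv track=rewrite | github.com/dcschenc/myleetcode | 2258-elements-in-array-after-removing-and-replacing-elements/2258-elements-in-array-after-removing-and-replacing-elements.py | elementInNums
-- ===== SOURCE A (Python) =====
-- from typing import List
--
-- def elementInNums(nums: List[int], queries: List[List[int]]) -> List[int]:
--     n = len(nums)
--     ans = []
--     for t, idx in queries:
--         times = t // n
--         if times % 2 == 0:
--             mod = t % n
--             left = n - mod
--             if idx >= left:
--                 ans.append(-1)
--             else:
--                 ans.append(nums[mod + idx])
--         else:
--             left = t % n
--             if idx >= left:
--                 ans.append(-1)
--             else: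
--                 ans.append(nums[idx])
--     return ans
-- ===== SOURCE B (Python) =====
-- from typing import List
--
-- def elementInNums(nums: List[int], queries: List[List[int]]) -> List[int]:
--     n = len(nums)
--     out = []
--     for t, idx in queries:
--         # replay the remainder of the 2n-minute cycle minute by minute,
--         # tracking how many removals happened (shift) and the current size
--         shift, size = 0, n
--         for _ in range(t % (2 * n)):
--             if shift < n:
--                 shift, size = shift + 1, size - 1
--             else:
--                 size += 1
--         out.append(-1 if idx >= size else nums[(shift + idx) % n])
--     return out
-- ===== Notes on version B (the rewrite author's own statement) =====
-- stated objective: alternative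
-- what changed: B replaces A's closed-form floor-division/parity arithmetic by a direct simulation: it replays the t % (2n) remaining minutes of the cycle one by one, maintaining a (shift, size) state of the evolving array, and answers with a single unified circular lookup nums[(shift+idx) % n] with no parity branch.
import Mathlib
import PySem

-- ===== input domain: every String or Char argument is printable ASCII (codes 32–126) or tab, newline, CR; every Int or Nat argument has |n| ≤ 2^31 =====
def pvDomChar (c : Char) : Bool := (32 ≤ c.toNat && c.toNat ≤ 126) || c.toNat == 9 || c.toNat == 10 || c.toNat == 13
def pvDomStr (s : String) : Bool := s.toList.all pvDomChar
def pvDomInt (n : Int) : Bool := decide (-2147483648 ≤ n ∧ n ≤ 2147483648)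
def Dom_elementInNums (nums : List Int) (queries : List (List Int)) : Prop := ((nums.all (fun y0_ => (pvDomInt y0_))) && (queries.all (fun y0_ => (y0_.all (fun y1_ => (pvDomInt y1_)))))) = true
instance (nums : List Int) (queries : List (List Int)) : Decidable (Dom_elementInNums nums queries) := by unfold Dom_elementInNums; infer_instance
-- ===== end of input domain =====

-- B replaces A's per-query floordiv/parity arithmetic by a minute-by-minute simulation of the
-- remaining t % (2n) cycle steps over a (shift, size) state with one circular lookup
-- (objective: alternative); proved equal to A on every input on which A returns.

-- ===== PORT A =====
def elementInNums (nums : List Int) (queries : List (List Int)) : List Int :=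
  let n : Int := nums.length
  queries.foldl (fun ans q =>
    match q with
    | [t, idx] =>
      let times := PySem.Int.floordiv t n
      if PySem.Int.mod times 2 == 0 then
        let m := PySem.Int.mod t n
        let left := n - m
        if idx ≥ left then ans ++ [-1]
        else ans ++ [PySem.List.pyGetD nums (m + idx) 0]   -- nums[mod+idx]; in range under Pre_
      else
        let left := PySem.Int.mod t n
        if idx ≥ left then ans ++ [-1]
        else ans ++ [PySem.List.pyGetD nums idx 0]          -- nums[idx]; in range under Pre_
    | _ => ans) []   -- a query not of the form [t, idx] raises on unpacking; outside Pre_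

-- ===== PORT B =====
def elementInNums_alt (nums : List Int) (queries : List (List Int)) : List Int :=
  let n : Int := nums.length
  queries.foldl (fun out q =>
    if q.length = 2 then   -- the 't, idx = q' unpacking; any other shape raises in Python (outside Pre_)
      let t := q.getD 0 0
      let idx := q.getD 1 0
      -- replay the remainder of the 2n-minute cycle minute by minute on a (shift, size) state
      let st := (PySem.List.pyRange 0 (PySem.Int.mod t (2 * n)) 1).foldl
        (fun (st : Int × Int) _ =>
          if st.1 < n then (st.1 + 1, st.2 - 1) else (st.1, st.2 + 1)) (0, n)
      out ++ [if idx ≥ st.2 then -1 else PySem.List.pyGetD nums (PySem.Int.mod (st.1 + idx) n) 0]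
    else out) []

-- ===== PRECONDITION & SPEC =====
-- Pre_ excludes exactly the inputs on which the Python A raises: empty nums with at least one query
-- (ZeroDivisionError in t // n), a query not of the form [t, idx] (unpacking ValueError), and a phase
-- lookup whose index falls below -len(nums) (IndexError).  On every input Pre_ admits, A returns a value.
def preQOK (n : Int) (q : List Int) : Bool :=
  q.length == 2 &&
  (let t := q.getD 0 0
   let idx := q.getD 1 0
   if PySem.Int.mod t (2 * n) < n
   then decide (-n ≤ PySem.Int.mod t n + idx)
   else decide (-n ≤ idx))

def Pre_elementInNums (nums : List Int) (queries : List (List Int)) : Prop :=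
  (queries = [] ∨ nums ≠ []) ∧ ∀ q ∈ queries, preQOK nums.length q = true
instance (nums : List Int) (queries : List (List Int)) : Decidable (Pre_elementInNums nums queries) := by
  unfold Pre_elementInNums; infer_instance

def pvWitness_elementInNums : List Int × List (List Int) :=
  ([1, 2, 3], [[0, 0], [3, 1], [4, 2], [7, -1], [10, 10]])

def Spec_elementInNums (nums : List Int) (queries : List (List Int)) (out : List Int) : Prop := out = elementInNums_alt nums queries
instance (nums : List Int) (queries : List (List Int)) (out : List Int) : Decidable (Spec_elementInNums nums queries out) := by unfold Spec_elementInNums; infer_instance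

-- ===== CLAIM (what is proved, stated in full; the proofs are below) =====
def Claim_equal_elementInNums : Prop := ∀ (nums : List Int) (queries : List (List Int)), Dom_elementInNums nums queries → Pre_elementInNums nums queries → Spec_elementInNums nums queries (elementInNums nums queries)

-- ===== LEMMAS AND PROOFS =====

-- r := t % (2n) splits t's cycle into the two phases: 0 ≤ r < 2n, t % n = r resp. r - n,
-- and (t // n) is even exactly when r < n.
lemma phase (t n : Int) (hn : 0 < n) :
    0 ≤ PySem.Int.mod t (2 * n) ∧ PySem.Int.mod t (2 * n) < 2 * n ∧
    PySem.Int.mod t n = PySem.Int.mod t (2 * n) - (if PySem.Int.mod t (2 * n) < n then 0 else n) ∧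
    (PySem.Int.mod (PySem.Int.floordiv t n) 2 = 0 ↔ PySem.Int.mod t (2 * n) < n) := by
  have h2n : (0:Int) < 2 * n := by omega
  rw [PySem.Int.mod_eq_emod_of_pos h2n, PySem.Int.mod_eq_emod_of_pos hn,
      PySem.Int.floordiv_eq_ediv_of_pos hn,
      PySem.Int.mod_eq_emod_of_pos (by norm_num : (0:Int) < 2)]
  have hr0 : 0 ≤ t % (2 * n) := Int.emod_nonneg t (by omega)
  have hr2 : t % (2 * n) < 2 * n := Int.emod_lt_of_pos t h2n
  have hmm : t % n = t % (2 * n) % n := (Int.emod_emod_of_dvd t ⟨2, by ring⟩).symm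
  refine ⟨hr0, hr2, ?_, ?_⟩
  · rw [hmm]
    by_cases hc : t % (2 * n) < n
    · rw [if_pos hc, Int.emod_eq_of_lt hr0 hc]; ring
    · rw [if_neg hc, (Int.sub_emod_right (t % (2 * n)) n).symm,
          Int.emod_eq_of_lt (by omega) (by omega)]
  · have ht : 2 * n * (t / (2 * n)) + t % (2 * n) = t := Int.mul_ediv_add_emod t (2 * n)
    have htn : t / n = t % (2 * n) / n + t / (2 * n) * 2 := by
      conv_lhs => rw [show t = t % (2 * n) + t / (2 * n) * 2 * n by linarith]
      exact Int.add_mul_ediv_right _ _ (by omega)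
    have hu0 : (0:Int) ≤ t % (2 * n) / n := by rw [Int.le_ediv_iff_mul_le hn]; omega
    have hu1 : t % (2 * n) / n < 2 := by rw [Int.ediv_lt_iff_lt_mul hn]; omega
    have hulo : t % (2 * n) < n → t % (2 * n) / n < 1 := fun h => by
      rw [Int.ediv_lt_iff_lt_mul hn]; omega
    have huhi : n ≤ t % (2 * n) → 1 ≤ t % (2 * n) / n := fun h => by
      rw [Int.le_ediv_iff_mul_le hn]; omega
    rw [htn]
    have key : ∀ u k : Int, 0 ≤ u → u < 2 → (t % (2 * n) < n → u < 1) →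
        (n ≤ t % (2 * n) → 1 ≤ u) → ((u + k * 2) % 2 = 0 ↔ t % (2 * n) < n) := by
      intro u k h1 h2 h3 h4
      constructor
      · intro h; by_contra hc; have := h4 (by omega); omega
      · intro h; have := h3 h; omega
    exact key _ _ hu0 hu1 hulo huhi

-- a fold whose step ignores the elements is an iterate of the step, length many times
lemma foldl_ignore {α β : Type} (g : α → α) (l : List β) (init : α) :
    l.foldl (fun s _ => g s) init = g^[l.length] init := by
  induction l generalizing init with
  | nil => rfl
  | cons x xs ih => simp [List.foldl_cons, ih, Function.iterate_succ_apply]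

-- the simulated (shift, size) state after k minutes, in closed form
lemma sim_closed (n : Int) (hn : 0 < n) (k : Nat) :
    (fun (st : Int × Int) =>
      if st.1 < n then (st.1 + 1, st.2 - 1) else (st.1, st.2 + 1))^[k] ((0 : Int), n)
    = (min (k : Int) n, if (k : Int) ≤ n then n - k else (k : Int) - n) := by
  induction k with
  | zero => simp; omega
  | succ k ih =>
    rw [Function.iterate_succ_apply', ih]
    by_cases hk : (k : Int) < n
    · rw [if_pos (by omega : min (k : Int) n < n)]
      push_cast
      simp only [Prod.mk.injEq]
      split_ifs <;> omega
    · rw [if_neg (by omega : ¬ min (k : Int) n < n)]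
      push_cast
      simp only [Prod.mk.injEq]
      split_ifs <;> omega

-- looking nums up at (v mod n) is the same Python lookup as at v, for v in [-n, n)
lemma pyGetD_mod (nums : List Int) (v : Int) (hn : (0:Int) < nums.length)
    (h1 : -(nums.length : Int) ≤ v) (h2 : v < nums.length) :
    PySem.List.pyGetD nums (PySem.Int.mod v (nums.length : Int)) 0 = PySem.List.pyGetD nums v 0 := by
  rw [PySem.Int.mod_eq_emod_of_pos hn]
  by_cases hv : 0 ≤ v
  · rw [Int.emod_eq_of_lt hv h2]
  · have hmodeq : v % (nums.length : Int) = v + nums.length := by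
      have h := Int.add_mul_emod_self_left (a := v + nums.length) (b := (nums.length : Int)) (c := -1)
      rw [Int.emod_eq_of_lt (a := v + (nums.length : Int)) (by omega) (by omega),
          show v + (nums.length : Int) + (nums.length : Int) * (-1) = v by ring] at h
      exact h
    have hr := PySem.List.pyGetD_neg_natCast nums (-v).toNat 0 (by omega) (by omega)
    rw [show -((((-v).toNat : Nat)) : Int) = v by omega] at hr
    rw [hmodeq, PySem.List.pyGetD_eq_getElem nums 0 (by omega) (by omega), hr]
    congr 1
    omega

-- one query: A's parity branch equals B's simulated state + circular lookup
lemma step_eq (nums acc : List Int) (t idx : Int) (hn : (0:Int) < (nums.length : Int))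
    (hp : (if PySem.Int.mod t (2 * (nums.length : Int)) < (nums.length : Int)
           then decide (-(nums.length : Int) ≤ PySem.Int.mod t (nums.length : Int) + idx)
           else decide (-(nums.length : Int) ≤ idx)) = true) :
    (if PySem.Int.mod (PySem.Int.floordiv t (nums.length : Int)) 2 == 0 then
       if idx ≥ (nums.length : Int) - PySem.Int.mod t (nums.length : Int) then acc ++ [(-1 : Int)]
       else acc ++ [PySem.List.pyGetD nums (PySem.Int.mod t (nums.length : Int) + idx) 0]
     else
       if idx ≥ PySem.Int.mod t (nums.length : Int) then acc ++ [(-1 : Int)]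
       else acc ++ [PySem.List.pyGetD nums idx 0])
    = acc ++ [
        (fun st : Int × Int =>
          if idx ≥ st.2 then (-1 : Int)
          else PySem.List.pyGetD nums (PySem.Int.mod (st.1 + idx) (nums.length : Int)) 0)
        ((PySem.List.pyRange 0 (PySem.Int.mod t (2 * (nums.length : Int))) 1).foldl
          (fun (st : Int × Int) _ =>
            if st.1 < (nums.length : Int) then (st.1 + 1, st.2 - 1) else (st.1, st.2 + 1))
          (0, (nums.length : Int)))] := by
  set n : Int := (nums.length : Int) with hdefn
  obtain ⟨hr0, hr2, hm, hparity⟩ := phase t n hn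
  set r : Int := PySem.Int.mod t (2 * n) with hdefr
  have hst : (PySem.List.pyRange 0 r 1).foldl
      (fun (st : Int × Int) _ => if st.1 < n then (st.1 + 1, st.2 - 1) else (st.1, st.2 + 1))
      (0, n)
      = (min r n, if r ≤ n then n - r else r - n) := by
    rw [foldl_ignore, PySem.List.length_pyRange_one, sim_closed n hn,
        show (((r - 0).toNat : Nat) : Int) = r by omega]
  rw [hst]
  by_cases hc : r < n
  · -- removal phase: t // n even, t % n = r
    rw [if_pos hc] at hp hm
    have heven : PySem.Int.mod (PySem.Int.floordiv t n) 2 = 0 := hparity.mpr hc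
    rw [decide_eq_true_iff] at hp
    simp only [heven, beq_self_eq_true, if_true, hm, sub_zero]
    have hmin : min r n = r := by omega
    have hle : r ≤ n := by omega
    simp only [hmin, if_pos hle]
    split_ifs with hguard
    · rfl
    · rw [hm, sub_zero] at hp
      rw [pyGetD_mod nums (r + idx) hn (by omega) (by omega)]
  · -- replace phase: t // n odd, t % n = r - n
    rw [if_neg hc] at hp hm
    have hodd : (PySem.Int.mod (PySem.Int.floordiv t n) 2 == 0) = false := by
      simp only [beq_eq_false_iff_ne, ne_eq]
      exact fun h => hc (hparity.mp h)
    rw [decide_eq_true_iff] at hp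
    simp only [hodd, Bool.false_eq_true, if_false, hm]
    have hmin : min r n = n := by omega
    have hsz : (if r ≤ n then n - r else r - n) = r - n := by
      by_cases he : r ≤ n
      · rw [if_pos he]; omega
      · rw [if_neg he]
    simp only [hmin, hsz]
    split_ifs with hguard
    · rfl
    · have hmod : PySem.Int.mod (n + idx) n = PySem.Int.mod idx n := by
        rw [PySem.Int.mod_eq_emod_of_pos hn, PySem.Int.mod_eq_emod_of_pos hn]
        rw [Int.add_comm]
        simp
      rw [hmod, pyGetD_mod nums idx hn (by omega) (by omega)]

-- ===== VERDICT (by name: the statement is the Claim_ definition above) =====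
theorem elementInNums_spec : Claim_equal_elementInNums := by
  intro nums queries _ hpre
  obtain ⟨hor, hq⟩ := hpre
  unfold Spec_elementInNums elementInNums elementInNums_alt
  simp only []
  apply PySem.List.foldl_congr_mem
  intro acc q hmem
  have hp := hq q hmem
  have hne : nums ≠ [] := by
    rcases hor with h | h
    · rw [h] at hmem; exact absurd hmem (List.not_mem_nil)
    · exact h
  have hn : (0:Int) < (nums.length : Int) := by
    have : nums.length ≠ 0 := fun h => hne (List.eq_nil_of_length_eq_zero h)
    omega
  rcases q with _ | ⟨t, q⟩
  · simp [preQOK] at hp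
  rcases q with _ | ⟨idx, q⟩
  · simp [preQOK] at hp
  rcases q with _ | ⟨x, q⟩
  · exact step_eq nums acc t idx hn (by simpa [preQOK] using hp)
  · simp [preQOK] at hp
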